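-- pv_equiv track=rewrite | github.com/eriktks/data-processing | anonymize-eng.py | compressPER
-- ===== SOURCE A (Python) =====
-- PER = "PERSON"
--
-- NAMEWORDS = [ ]
--
-- def compressPER(tokens):
--     counter = 0
--     while counter < len(tokens):
--         if tokens[counter] != PER: counter += 1
--         else:
--             nextCounter = counter
--             allChecked = False
--             while not allChecked:
--                 if nextCounter < len(tokens)-1 and \
--                    tokens[nextCounter+1] == PER:
--                     nextCounter += 1
--                 elif nextCounter < len(tokens)-2 and \
--                    tokens[nextCounter+1] in NAMEWORDS and \
--                    tokens[nextCounter+2] == PER: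
--                     nextCounter += 2
--                 elif nextCounter < len(tokens)-2 and \
--                    tokens[nextCounter+1] in NAMEWORDS and \
--                    tokens[nextCounter+2] in NAMEWORDS and \
--                    tokens[nextCounter+3] == PER:
--                     nextCounter += 2
--                 else: allChecked = True
--             tokens = tokens[:counter]+[PER]+tokens[nextCounter+1:]
--             counter += 1
--     return(tokens)
-- ===== SOURCE B (Python) =====
-- PER = "PERSON"
--
-- def compressPER(tokens):
--     out = []
--     prev_per = False
--     for t in tokens:
--         if t == PER:
--             if not prev_per:
--                 out.append(t)
--             prev_per = True
--         else:
--             out.append(t)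
--             prev_per = False
--     return out
-- ===== Notes on version B (the rewrite author's own statement) =====
-- stated objective: alternative
-- what changed: Replaced the rebuild-the-list-by-slicing outer/inner while loops (quadratic in the worst case) with a single pass that appends each token unless it is a PERSON token immediately following another PERSON token; on the random timing inputs the two were of comparable speed.
import Mathlib
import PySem

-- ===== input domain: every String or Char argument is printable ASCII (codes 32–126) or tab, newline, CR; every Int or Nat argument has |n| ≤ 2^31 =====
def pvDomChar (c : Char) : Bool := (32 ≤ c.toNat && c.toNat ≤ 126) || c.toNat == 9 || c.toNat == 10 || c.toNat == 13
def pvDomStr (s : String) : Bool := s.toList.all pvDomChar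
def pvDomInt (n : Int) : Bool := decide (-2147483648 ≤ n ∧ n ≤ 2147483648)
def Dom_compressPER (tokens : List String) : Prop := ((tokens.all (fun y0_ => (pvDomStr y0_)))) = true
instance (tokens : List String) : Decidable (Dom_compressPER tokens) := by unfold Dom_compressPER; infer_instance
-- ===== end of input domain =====

-- ===== PORT A =====
-- B replaces A's collapse-by-slicing while loops with a single pass over the tokens; the return values are proved equal.
def pvPER : String := "PERSON"
def pvNAMEWORDS : List String := []

-- inner 'while not allChecked' loop of A: advances nextCounter while a branch fires.
-- fuel is only a totality guard (each step increases nextCounter, which A keeps < len(tokens),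
-- so fuel = len(tokens)+1 never runs out; the lemmas below only ever use fueled states with enough fuel).
-- Indices guarded in range by the preceding bound check are read with getD (exact there);
-- tokens[nextCounter+3] in the last branch is read with pyGet? (that branch is unreachable since pvNAMEWORDS = []).
def pvFindEndGo (tokens : List String) : Nat → Nat → Nat
  | 0, next => next
  | fuel+1, next =>
    if next < tokens.length - 1 ∧ tokens.getD (next+1) "" = pvPER then
      pvFindEndGo tokens fuel (next+1)
    else if next < tokens.length - 2 ∧ tokens.getD (next+1) "" ∈ pvNAMEWORDS ∧
        tokens.getD (next+2) "" = pvPER then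
      pvFindEndGo tokens fuel (next+2)
    else if next < tokens.length - 2 ∧ tokens.getD (next+1) "" ∈ pvNAMEWORDS ∧
        tokens.getD (next+2) "" ∈ pvNAMEWORDS ∧ PySem.List.pyGet? tokens ((next:Int)+3) = some pvPER then
      pvFindEndGo tokens fuel (next+2)
    else next

def pvFindEnd (tokens : List String) (next : Nat) : Nat :=
  pvFindEndGo tokens (tokens.length + 1) next

-- outer 'while counter < len(tokens)' loop of A (tokens[:counter] = take, tokens[nc+1:] = drop, both nonneg: exact);
-- fuel is again only a totality guard (each iteration increments counter and never grows the list).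
def pvLoopAGo : Nat → List String → Nat → List String
  | 0, tokens, _ => tokens
  | fuel+1, tokens, counter =>
    if counter < tokens.length then
      if tokens.getD counter "" ≠ pvPER then pvLoopAGo fuel tokens (counter+1)
      else
        let nc := pvFindEnd tokens counter
        pvLoopAGo fuel (tokens.take counter ++ [pvPER] ++ tokens.drop (nc+1)) (counter+1)
    else tokens

def compressPER (tokens : List String) : List String :=
  pvLoopAGo (tokens.length + 1) tokens 0

-- ===== PORT B =====
def compressPER_alt (tokens : List String) : List String :=
  (tokens.foldl (fun (st : List String × Bool) t =>
    if t = pvPER then (if st.2 then st else (st.1 ++ [t], true))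
    else (st.1 ++ [t], false)) ([], false)).1

-- ===== PRECONDITION & SPEC =====
def Spec_compressPER (tokens : List String) (out : List String) : Prop := out = compressPER_alt tokens
instance (tokens : List String) (out : List String) : Decidable (Spec_compressPER tokens out) := by unfold Spec_compressPER; infer_instance

-- ===== CLAIM (what is proved, stated in full; the proofs are below) =====
def Claim_equal_compressPER : Prop := ∀ (tokens : List String), Dom_compressPER tokens → Spec_compressPER tokens (compressPER tokens)

-- ===== LEMMAS AND PROOFS =====

-- reference single-pass collapse: recursion form of B's fold
def pvAltGo : Bool → List String → List String
  | _, [] => []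
  | b, t :: r => if t = pvPER then (if b then pvAltGo true r else t :: pvAltGo true r)
                 else t :: pvAltGo false r

theorem pvFold_eq_altGo (l : List String) (acc : List String) (b : Bool) :
    (l.foldl (fun (st : List String × Bool) t =>
      if t = pvPER then (if st.2 then st else (st.1 ++ [t], true))
      else (st.1 ++ [t], false)) (acc, b)).1 = acc ++ pvAltGo b l := by
  induction l generalizing acc b with
  | nil => simp [pvAltGo]
  | cons t r ih =>
    simp only [List.foldl_cons, pvAltGo]
    by_cases ht : t = pvPER <;> simp [ht]
    · cases b <;> simp [ih]
    · simp [ih]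

theorem pvFindEndGo_ge (tokens : List String) (fuel next : Nat) :
    next ≤ pvFindEndGo tokens fuel next := by
  induction fuel generalizing next with
  | zero => simp [pvFindEndGo]
  | succ fuel ih =>
    rw [pvFindEndGo]
    split_ifs with h1 h2 h3
    · have := ih (next+1); omega
    · have := ih (next+2); omega
    · have := ih (next+2); omega
    · omega

theorem pvFindEnd_ge (tokens : List String) (next : Nat) : next ≤ pvFindEnd tokens next :=
  pvFindEndGo_ge tokens (tokens.length + 1) next

-- with enough fuel, the inner loop lands one past a maximal run of PERSON tokens:
-- resuming the single pass with prevPer = true there is the same as restarting fresh after the run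
theorem pvAltGo_go_run (tokens : List String) (fuel next : Nat)
    (hfuel : tokens.length - next ≤ fuel) (hlt : next < tokens.length) :
    pvAltGo true (tokens.drop (next+1)) =
      pvAltGo false (tokens.drop (pvFindEndGo tokens fuel next + 1)) := by
  induction fuel generalizing next with
  | zero => omega
  | succ fuel ih =>
    rw [pvFindEndGo]
    by_cases h1 : next < tokens.length - 1 ∧ tokens.getD (next+1) "" = pvPER
    · rw [if_pos h1]
      have hc1 : next + 1 < tokens.length := by omega
      rw [tokens.drop_eq_getElem_cons hc1]
      have hgp : tokens[next+1] = pvPER := by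
        have := List.getD_eq_getElem tokens "" hc1; rw [← this]; exact h1.2
      rw [hgp]
      simp only [pvAltGo, if_pos rfl]
      exact ih (next+1) (by omega) hc1
    · rw [if_neg h1]
      have h2 : ¬ (next < tokens.length - 2 ∧ tokens.getD (next+1) "" ∈ pvNAMEWORDS ∧
          tokens.getD (next+2) "" = pvPER) := by simp [pvNAMEWORDS]
      have h3 : ¬ (next < tokens.length - 2 ∧ tokens.getD (next+1) "" ∈ pvNAMEWORDS ∧
          tokens.getD (next+2) "" ∈ pvNAMEWORDS ∧
          PySem.List.pyGet? tokens ((next:Int)+3) = some pvPER) := by simp [pvNAMEWORDS]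
      rw [if_neg h2, if_neg h3]
      by_cases hc1 : next + 1 < tokens.length
      · have hne : tokens[next+1] ≠ pvPER := by
          intro he
          exact h1 ⟨by omega, by rw [List.getD_eq_getElem tokens "" hc1]; exact he⟩
        rw [tokens.drop_eq_getElem_cons hc1]
        simp [pvAltGo, hne]
      · have hnil : tokens.drop (next+1) = [] := List.drop_eq_nil_of_le (by omega)
        rw [hnil]; simp [pvAltGo]

-- the outer loop, with enough fuel, leaves the processed prefix and single-passes the rest
theorem pvLoopAGo_eq (fuel : Nat) (tokens : List String) (counter : Nat)
    (hfuel : tokens.length - counter ≤ fuel) :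
    pvLoopAGo fuel tokens counter = tokens.take counter ++ pvAltGo false (tokens.drop counter) := by
  induction fuel generalizing tokens counter with
  | zero =>
    rw [pvLoopAGo]
    rw [List.take_of_length_le (by omega), List.drop_eq_nil_of_le (by omega)]
    simp [pvAltGo]
  | succ fuel ih =>
    rw [pvLoopAGo]
    by_cases h : counter < tokens.length
    · rw [if_pos h]
      by_cases hne : tokens.getD counter "" ≠ pvPER
      · rw [if_pos hne]
        rw [ih tokens (counter+1) (by omega)]
        have hneq : tokens[counter] ≠ pvPER := by
          rw [List.getD_eq_getElem tokens "" h] at hne; exact hne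
        rw [tokens.drop_eq_getElem_cons h]
        simp only [pvAltGo, if_neg hneq]
        rw [List.take_succ_eq_append_getElem h, List.append_assoc]
        rfl
      · rw [if_neg hne]
        push_neg at hne
        have hnc := pvFindEnd_ge tokens counter
        set nc := pvFindEnd tokens counter with hncdef
        have hlentake : (tokens.take counter).length = counter := by simp; omega
        have hlen : (tokens.take counter ++ [pvPER] ++ tokens.drop (nc+1)).length
            = counter + 1 + (tokens.length - (nc+1)) := by
          simp only [List.length_append, List.length_take, List.length_drop,
            List.length_cons, List.length_nil]
          omega
        rw [ih _ (counter+1) (by omega)]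
        have htake : (tokens.take counter ++ [pvPER] ++ tokens.drop (nc+1)).take (counter+1)
            = tokens.take counter ++ [pvPER] := by
          simp [List.take_append, hlentake]
        have hdrop : (tokens.take counter ++ [pvPER] ++ tokens.drop (nc+1)).drop (counter+1)
            = tokens.drop (nc+1) := by
          simp [List.drop_append, hlentake]
        rw [htake, hdrop]
        have hrun : pvAltGo false (tokens.drop counter) =
            pvPER :: pvAltGo false (tokens.drop (nc+1)) := by
          have hget : tokens[counter] = pvPER := by
            rw [← List.getD_eq_getElem tokens "" h]; exact hne
          rw [tokens.drop_eq_getElem_cons h, hget]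
          simp only [pvAltGo, if_pos rfl, if_neg Bool.false_ne_true]
          exact congrArg (pvPER :: ·)
            (pvAltGo_go_run tokens (tokens.length + 1) counter (by omega) h)
        rw [hrun]
        simp only [List.append_assoc, List.singleton_append]
    · rw [if_neg h]
      rw [List.take_of_length_le (by omega), List.drop_eq_nil_of_le (by omega)]
      simp [pvAltGo]

-- ===== VERDICT (by name: the statement is the Claim_ definition above) =====
theorem compressPER_spec : Claim_equal_compressPER := by
  intro tokens _
  unfold Spec_compressPER compressPER compressPER_alt
  rw [pvLoopAGo_eq (tokens.length + 1) tokens 0 (by omega)]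
  rw [pvFold_eq_altGo tokens [] false]
  simp
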